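-- pv_equiv track=rewrite | github.com/HugeChaos/Impossible-differentials-and-impossible-polytopic-transitions | Midori/Midori_model.py | __sbox_operate1
-- ===== SOURCE A (Python) =====
-- def __sbox_operate1(v1, v2):
--     sbox = [0xc, 0xa, 0xd, 3, 0xe, 0xb, 0xf, 7, 8, 9, 1, 5, 0, 2, 4, 6]
--     statement1 = "0bin1100"
--     for i in range(1, 16):
--         iv = "0bin"
--         for j in range(0, 4):
--             iv += "{}".format((i >> (3 - j)) & 0x1)
--         siv = "0bin"
--         for j in range(0, 4):
--             siv += "{}".format((sbox[i] >> (3 - j)) & 0x1)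
--         statement1 = "(IF {} = {} THEN {} ELSE {} ENDIF)".format(v1, iv, siv, statement1)
--     statement = "ASSERT({} = {});\n".format(v2, statement1)
--     return statement
-- ===== SOURCE B (Python) =====
-- def __sbox_operate1(v1, v2):
--     sbox = [0xc, 0xa, 0xd, 3, 0xe, 0xb, 0xf, 7, 8, 9, 1, 5, 0, 2, 4, 6]
--     prefix = ""
--     for i in range(15, 0, -1):
--         prefix += "(IF {} = 0bin{} THEN 0bin{} ELSE ".format(v1, format(i, '04b'), format(sbox[i], '04b'))
--     statement1 = prefix + "0bin1100" + " ENDIF)" * 15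
--     return "ASSERT({} = {});\n".format(v2, statement1)
-- ===== Notes on version B (the rewrite author's own statement) =====
-- stated objective: simpler
-- what changed: B assembles the nested CVC IF-string left-to-right in one pass (appending prefix segments for i = 15..1, then the innermost '0bin1100' literal, then 15 ' ENDIF)' closers) instead of A's repeated outward ELSE-wrapping that re-embeds the whole statement each iteration; the bit strings come from format(i,'04b') instead of A's per-bit inner loops.
import Mathlib
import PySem

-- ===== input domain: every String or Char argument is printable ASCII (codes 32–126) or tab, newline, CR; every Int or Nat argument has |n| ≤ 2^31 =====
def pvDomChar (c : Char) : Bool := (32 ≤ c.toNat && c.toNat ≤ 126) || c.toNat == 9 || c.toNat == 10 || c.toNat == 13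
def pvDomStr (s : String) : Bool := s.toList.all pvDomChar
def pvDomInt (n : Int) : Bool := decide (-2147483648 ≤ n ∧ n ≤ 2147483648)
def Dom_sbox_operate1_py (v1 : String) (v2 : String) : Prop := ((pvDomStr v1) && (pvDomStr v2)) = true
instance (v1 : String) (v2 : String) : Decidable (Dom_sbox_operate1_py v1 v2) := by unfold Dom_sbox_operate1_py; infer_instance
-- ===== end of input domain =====

-- B builds the nested CVC string left-to-right (prefix segments, then the innermost literal,
-- then 15 closers) instead of A's repeated outward ELSE-wrapping; objective: simpler decomposition.

-- ===== PORT A =====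
def sbox_operate1_py (v1 : String) (v2 : String) : String :=
  let sbox : List Int := [12, 10, 13, 3, 14, 11, 15, 7, 8, 9, 1, 5, 0, 2, 4, 6]
  let statement1 := (PySem.List.pyRange 1 16 1).foldl (fun (statement1 : String) (i : Int) =>
    let iv := (PySem.List.pyRange 0 4 1).foldl (fun (iv : String) (j : Int) =>
      iv ++ PySem.Int.toStr (PySem.Int.band (i >>> (3 - j)) 1)) "0bin"
    let siv := (PySem.List.pyRange 0 4 1).foldl (fun (siv : String) (j : Int) =>
      siv ++ PySem.Int.toStr (PySem.Int.band (PySem.List.pyGetD sbox i 0 >>> (3 - j)) 1)) "0bin"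
    "(IF " ++ v1 ++ " = " ++ iv ++ " THEN " ++ siv ++ " ELSE " ++ statement1 ++ " ENDIF)")
    "0bin1100"
  "ASSERT(" ++ v2 ++ " = " ++ statement1 ++ ");\n"

-- ===== PORT B =====
-- hand port of format(n, '04b'): exact for 0 ≤ n < 16 (the only arguments B passes)
def pvFmt04b (n : Int) : String :=
  (List.range 4).foldl (fun (acc : String) (k : Nat) => acc ++ PySem.Int.toStr (PySem.Int.band (n >>> ((3 : Int) - (k : Int))) 1)) ""

-- hand port of Python's  s * n  for a string and a nonnegative count (exact there)
def pvRepeat (s : String) : Nat → String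
  | 0 => ""
  | n + 1 => s ++ pvRepeat s n

def sbox_operate1_py_alt (v1 : String) (v2 : String) : String :=
  let sbox : List Int := [12, 10, 13, 3, 14, 11, 15, 7, 8, 9, 1, 5, 0, 2, 4, 6]
  let pre0 := (PySem.List.pyRange 15 0 (-1)).foldl (fun (pre : String) (i : Int) =>
    pre ++ "(IF " ++ v1 ++ " = 0bin" ++ pvFmt04b i ++ " THEN 0bin"
        ++ pvFmt04b (PySem.List.pyGetD sbox i 0) ++ " ELSE ") ""
  let statement1 := pre0 ++ "0bin1100" ++ pvRepeat " ENDIF)" 15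
  "ASSERT(" ++ v2 ++ " = " ++ statement1 ++ ");\n"

-- ===== PRECONDITION & SPEC =====
def Spec_sbox_operate1_py (v1 : String) (v2 : String) (out : String) : Prop := out = sbox_operate1_py_alt v1 v2
instance (v1 : String) (v2 : String) (out : String) : Decidable (Spec_sbox_operate1_py v1 v2 out) := by unfold Spec_sbox_operate1_py; infer_instance

-- ===== CLAIM (what is proved, stated in full; the proofs are below) =====
def Claim_equal_sbox_operate1_py : Prop := ∀ (v1 : String) (v2 : String), Dom_sbox_operate1_py v1 v2 → Spec_sbox_operate1_py v1 v2 (sbox_operate1_py v1 v2)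

-- ===== LEMMAS AND PROOFS =====

-- Nested ELSE-wrapping (A's loop shape) = reversed prefix concatenation ++ seed ++ closers (B's shape).
theorem pv_wrap_fold (seg : Int → String) (E : String) (l : List Int) : ∀ (s0 : String),
    l.foldl (fun st i => seg i ++ st ++ E) s0
      = (l.reverse.foldl (fun acc i => acc ++ seg i) "") ++ s0 ++ pvRepeat E l.length := by
  induction l with
  | nil => intro s0; simp [pvRepeat]
  | cons i t ih =>
    intro s0
    simp only [List.foldl]
    rw [ih]
    simp only [List.reverse_cons, List.foldl_append, List.foldl, List.length_cons, pvRepeat,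
               String.append_assoc]

-- A's inner 4-bit loop produces "0bin" ++ pvFmt04b n (same bits, same order).
theorem pv_iv_eq (n : Int) :
    (PySem.List.pyRange 0 4 1).foldl (fun (iv : String) (j : Int) =>
        iv ++ PySem.Int.toStr (PySem.Int.band (n >>> (3 - j)) 1)) "0bin"
      = "0bin" ++ pvFmt04b n := by
  rw [show PySem.List.pyRange 0 4 1 = [0, 1, 2, 3] from by decide, pvFmt04b,
      show List.range 4 = [0, 1, 2, 3] from by decide]
  simp only [List.foldl]
  norm_num [String.append_assoc]

-- One accumulation step of A's (reversed) segment list = one step of B's prefix loop.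
theorem pv_seg_step (acc v1 x y : String) :
    acc ++ ("(IF " ++ v1 ++ " = " ++ ("0bin" ++ x) ++ " THEN " ++ ("0bin" ++ y) ++ " ELSE ")
      = acc ++ "(IF " ++ v1 ++ " = 0bin" ++ x ++ " THEN 0bin" ++ y ++ " ELSE " := by
  rw [← String.toList_inj]
  simp only [String.toList_append, List.append_assoc,
    show ("(IF " : String).toList = ['(', 'I', 'F', ' '] from by decide,
    show (" = " : String).toList = [' ', '=', ' '] from by decide,
    show ("0bin" : String).toList = ['0', 'b', 'i', 'n'] from by decide,
    show (" THEN " : String).toList = [' ', 'T', 'H', 'E', 'N', ' '] from by decide,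
    show (" ELSE " : String).toList = [' ', 'E', 'L', 'S', 'E', ' '] from by decide,
    show (" = 0bin" : String).toList = [' ', '=', ' ', '0', 'b', 'i', 'n'] from by decide,
    show (" THEN 0bin" : String).toList = [' ', 'T', 'H', 'E', 'N', ' ', '0', 'b', 'i', 'n'] from by decide,
    List.cons_append, List.nil_append]

theorem ports_agree (v1 v2 : String) : sbox_operate1_py v1 v2 = sbox_operate1_py_alt v1 v2 := by
  simp only [sbox_operate1_py, sbox_operate1_py_alt]
  rw [pv_wrap_fold]
  rw [show (PySem.List.pyRange 1 16 1).reverse = PySem.List.pyRange 15 0 (-1) from by decide,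
      show (PySem.List.pyRange 1 16 1).length = 15 from by decide]
  have hfun : (fun (acc : String) (i : Int) => acc ++ ("(IF " ++ v1 ++ " = "
          ++ ((PySem.List.pyRange 0 4 1).foldl (fun (iv : String) (j : Int) =>
                iv ++ PySem.Int.toStr (PySem.Int.band (i >>> (3 - j)) 1)) "0bin")
          ++ " THEN "
          ++ ((PySem.List.pyRange 0 4 1).foldl (fun (siv : String) (j : Int) =>
                siv ++ PySem.Int.toStr (PySem.Int.band
                  (PySem.List.pyGetD ([12, 10, 13, 3, 14, 11, 15, 7, 8, 9, 1, 5, 0, 2, 4, 6] : List Int) i 0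
                    >>> (3 - j)) 1)) "0bin")
          ++ " ELSE "))
      = (fun (pre : String) (i : Int) =>
          pre ++ "(IF " ++ v1 ++ " = 0bin" ++ pvFmt04b i ++ " THEN 0bin"
            ++ pvFmt04b (PySem.List.pyGetD ([12, 10, 13, 3, 14, 11, 15, 7, 8, 9, 1, 5, 0, 2, 4, 6] : List Int) i 0)
            ++ " ELSE ") := by
    funext acc i
    rw [pv_iv_eq, pv_iv_eq]
    exact pv_seg_step acc v1 (pvFmt04b i)
      (pvFmt04b (PySem.List.pyGetD ([12, 10, 13, 3, 14, 11, 15, 7, 8, 9, 1, 5, 0, 2, 4, 6] : List Int) i 0))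
  rw [hfun]

-- ===== VERDICT (by name: the statement is the Claim_ definition above) =====
theorem sbox_operate1_py_spec : Claim_equal_sbox_operate1_py := by
  intro v1 v2 _
  exact ports_agree v1 v2
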